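-- pv_equiv track=rewrite | github.com/LindgeW/MetaAug4NER | utils/tag_util.py | extract_cws_bi_span
-- ===== SOURCE A (Python) =====
-- def extract_cws_bi_span(tag_seq):
--     spans = []
--     s = 0
--     n = len(tag_seq)
--     start = False
--     for i, tag in enumerate(tag_seq):
--         if tag == 'B':
--             s = i
--             if i + 1 == n or tag_seq[i + 1] != 'I':
--                 spans.append((s, i))
--                 start = False
--             else:
--                 start = True
--         elif tag == 'I':
--             if start:
--                 if i + 1 == n or tag_seq[i + 1] != 'I':
--                     spans.append((s, i))
--                     start = False
--         else:
--             start = False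
--     return spans
-- ===== SOURCE B (Python) =====
-- def extract_cws_bi_span(tag_seq):
--     spans = []
--     start = None
--     for i, tag in enumerate(tag_seq):
--         if tag == 'B':
--             if start is not None:
--                 spans.append((start, i - 1))
--             start = i
--         elif tag == 'I':
--             pass
--         else:
--             if start is not None:
--                 spans.append((start, i - 1))
--             start = None
--     if start is not None:
--         spans.append((start, len(tag_seq) - 1))
--     return spans
-- ===== Notes on version B (the rewrite author's own statement) =====
-- stated objective: simpler
-- what changed: Replaced the one-step look-ahead at tag_seq[i+1] by a deferred-close state machine: keep an optional open start, close the open span at the next 'B'/other tag (or flush after the loop), never reading ahead.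
import Mathlib
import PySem

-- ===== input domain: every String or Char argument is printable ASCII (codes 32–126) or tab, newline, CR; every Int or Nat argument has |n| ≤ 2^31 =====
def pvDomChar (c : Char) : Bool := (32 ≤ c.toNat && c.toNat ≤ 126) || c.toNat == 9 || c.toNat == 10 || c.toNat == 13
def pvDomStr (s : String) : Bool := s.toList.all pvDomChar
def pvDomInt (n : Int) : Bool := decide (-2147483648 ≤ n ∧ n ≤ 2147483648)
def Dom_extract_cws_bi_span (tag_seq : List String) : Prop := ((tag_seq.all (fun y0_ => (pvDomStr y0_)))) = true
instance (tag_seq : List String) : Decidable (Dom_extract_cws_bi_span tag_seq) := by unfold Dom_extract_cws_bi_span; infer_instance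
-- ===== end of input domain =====

-- B replaces A's one-step look-ahead by a deferred-close state machine (simpler: no tag_seq[i+1] reads); return value proved identical.

-- ===== PORT A =====
-- A's loop over enumerate(tag_seq); the look-ahead tag_seq[i+1] is read as the head of the
-- remaining list `rest` (exact: the branch is guarded by `i + 1 == n`, and rest.head? = tag_seq[i+1] there).
def extract_cws_bi_span_loop (rem : List String) (i n : Int)
    (spans : List (Int × Int)) (s : Int) (start : Bool) : List (Int × Int) :=
  match rem with
  | [] => spans
  | tag :: rest =>
    if tag = "B" then
      -- s = i
      if i + 1 = n ∨ (rest.head?.getD "") ≠ "I" then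
        extract_cws_bi_span_loop rest (i + 1) n (spans ++ [(i, i)]) i false
      else
        extract_cws_bi_span_loop rest (i + 1) n spans i true
    else if tag = "I" then
      if start then
        if i + 1 = n ∨ (rest.head?.getD "") ≠ "I" then
          extract_cws_bi_span_loop rest (i + 1) n (spans ++ [(s, i)]) s false
        else
          extract_cws_bi_span_loop rest (i + 1) n spans s true
      else
        extract_cws_bi_span_loop rest (i + 1) n spans s false
    else
      extract_cws_bi_span_loop rest (i + 1) n spans s false

def extract_cws_bi_span (tag_seq : List String) : List (Int × Int) :=
  extract_cws_bi_span_loop tag_seq 0 (tag_seq.length : Int) [] 0 false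

-- ===== PORT B =====
-- deferred-close state machine: `start : Option Int` is the open span's first index; a 'B' or a
-- non-'I' tag closes the open span at (start, i-1); after the loop an open span is flushed at n-1 = i-1.
def extract_cws_bi_span_alt_loop (rem : List String) (i : Int)
    (spans : List (Int × Int)) (start : Option Int) : List (Int × Int) :=
  match rem with
  | [] =>
    match start with
    | some s => spans ++ [(s, i - 1)]
    | none => spans
  | tag :: rest =>
    if tag = "B" then
      extract_cws_bi_span_alt_loop rest (i + 1)
        (match start with
         | some s => spans ++ [(s, i - 1)]
         | none => spans) (some i)
    else if tag = "I" then
      extract_cws_bi_span_alt_loop rest (i + 1) spans start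
    else
      extract_cws_bi_span_alt_loop rest (i + 1)
        (match start with
         | some s => spans ++ [(s, i - 1)]
         | none => spans) none

def extract_cws_bi_span_alt (tag_seq : List String) : List (Int × Int) :=
  extract_cws_bi_span_alt_loop tag_seq 0 [] none

-- ===== PRECONDITION & SPEC =====
def Spec_extract_cws_bi_span (tag_seq : List String) (out : List (Int × Int)) : Prop := out = extract_cws_bi_span_alt tag_seq
instance (tag_seq : List String) (out : List (Int × Int)) : Decidable (Spec_extract_cws_bi_span tag_seq out) := by unfold Spec_extract_cws_bi_span; infer_instance

-- ===== CLAIM (what is proved, stated in full; the proofs are below) =====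
def Claim_equal_extract_cws_bi_span : Prop := ∀ (tag_seq : List String), Dom_extract_cws_bi_span tag_seq → Spec_extract_cws_bi_span tag_seq (extract_cws_bi_span tag_seq)

-- ===== LEMMAS AND PROOFS =====

-- Main invariant, three coupled states of the two loops on a common suffix `rem` at index `i`
-- (with i + |rem| = n):
--  (1) both loops idle (A: start=false, B: start=none): same spans;
--  (2) both loops open (A was told by its look-ahead that the head of rem is 'I');
--  (3) A already closed the pending span (s0, i-1), B still holds it open and will
--      emit it next (the head of rem is not 'I').
theorem extract_cws_bi_span_key (rem : List String) :
    ∀ (i n : Int) (spans : List (Int × Int)), i + (rem.length : Int) = n →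
      (∀ s, extract_cws_bi_span_loop rem i n spans s false
            = extract_cws_bi_span_alt_loop rem i spans none) ∧
      (∀ s0, (rem.head?.getD "") = "I" →
            extract_cws_bi_span_loop rem i n spans s0 true
            = extract_cws_bi_span_alt_loop rem i spans (some s0)) ∧
      (∀ s0 s1, (rem.head?.getD "") ≠ "I" →
            extract_cws_bi_span_loop rem i n (spans ++ [(s0, i - 1)]) s1 false
            = extract_cws_bi_span_alt_loop rem i spans (some s0)) := by
  induction rem with
  | nil =>
    intro i n spans hn
    refine ⟨fun s => rfl, fun s0 h => by simp at h, fun s0 s1 _ => rfl⟩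
  | cons tag rest ih =>
    intro i n spans hn
    have hn' : i + 1 + (rest.length : Int) = n := by
      simp at hn; omega
    have hend : ¬ (i + 1 = n) ∨ rest = [] := by
      rcases rest with _ | ⟨r, rs⟩
      · exact Or.inr rfl
      · left; simp at hn; omega
    -- the guard of A simplifies: i+1 = n ↔ rest = [] (and then head?.getD "" = "" ≠ "I")
    have hguard : (i + 1 = n ∨ (rest.head?.getD "") ≠ "I") ↔ ((rest.head?.getD "") ≠ "I") := by
      constructor
      · rintro (h | h)
        · rcases hend with h' | h'
          · exact absurd h h'
          · subst h'; simp
        · exact h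
      · exact Or.inr
    have hnend : (rest.head?.getD "") = "I" → ¬ (i + 1 = n) := by
      intro hI
      rcases hend with h | h
      · exact h
      · subst h; simp at hI
    refine ⟨?_, ?_, ?_⟩
    · -- (1) idle / idle
      intro s
      by_cases hB : tag = "B"
      · subst hB
        rw [extract_cws_bi_span_loop, extract_cws_bi_span_alt_loop]
        by_cases hI : (rest.head?.getD "") = "I"
        · simpa [hguard, hI, hnend hI] using (ih (i+1) n spans hn').2.1 i hI
        · simpa [hguard, hI] using (ih (i+1) n spans hn').2.2 i i hI
      · by_cases hI : tag = "I"
        · subst hI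
          rw [extract_cws_bi_span_loop, extract_cws_bi_span_alt_loop]
          simpa using (ih (i+1) n spans hn').1 s
        · rw [extract_cws_bi_span_loop, extract_cws_bi_span_alt_loop]
          simpa [hB, hI] using (ih (i+1) n spans hn').1 s
    · -- (2) open / open: head is "I", so tag = "I"
      intro s0 hhead
      have htag : tag = "I" := by simpa using hhead
      subst htag
      rw [extract_cws_bi_span_loop, extract_cws_bi_span_alt_loop]
      by_cases hI : (rest.head?.getD "") = "I"
      · simpa [hguard, hI, hnend hI] using (ih (i+1) n spans hn').2.1 s0 hI
      · simpa [hguard, hI] using (ih (i+1) n spans hn').2.2 s0 s0 hI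
    · -- (3) A closed early, B pending: head ≠ "I", so tag ≠ "I"
      intro s0 s1 hhead
      have htag : tag ≠ "I" := by simpa using hhead
      by_cases hB : tag = "B"
      · subst hB
        rw [extract_cws_bi_span_loop, extract_cws_bi_span_alt_loop]
        by_cases hI : (rest.head?.getD "") = "I"
        · simpa [hguard, hI, hnend hI] using (ih (i+1) n (spans ++ [(s0, i - 1)]) hn').2.1 i hI
        · simpa [hguard, hI] using (ih (i+1) n (spans ++ [(s0, i - 1)]) hn').2.2 i i hI
      · rw [extract_cws_bi_span_loop, extract_cws_bi_span_alt_loop]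
        simpa [hB, htag] using (ih (i+1) n (spans ++ [(s0, i - 1)]) hn').1 s1
-- ===== VERDICT (by name: the statement is the Claim_ definition above) =====
theorem extract_cws_bi_span_spec : Claim_equal_extract_cws_bi_span := by
  intro tag_seq _
  unfold Spec_extract_cws_bi_span extract_cws_bi_span extract_cws_bi_span_alt
  exact (extract_cws_bi_span_key tag_seq 0 (tag_seq.length : Int) [] (by simp)).1 0
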